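-- pv_equiv track=rewrite | github.com/Squishy6094/sm64coopdx-manager | SquishyManager.py | folder_from_file_dir
-- ===== SOURCE A (Python) =====
-- def folder_from_file_dir(filename):
--     filename = filename.replace("\\", "/")
--     splitDir = filename.split("/")
--     dirCount = 0
--     returnString = ""
--     for x in splitDir:
--         dirCount = dirCount + 1
--         if dirCount < len(splitDir):
--             returnString = returnString + x + "/"
--     return returnString
-- ===== SOURCE B (Python) =====
-- def folder_from_file_dir(filename):
--     filename = filename.replace("\\", "/")
--     idx = filename.rfind("/")
--     if idx == -1:
--         return ""
--     return filename[:idx + 1]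
-- ===== Notes on version B (the rewrite author's own statement) =====
-- stated objective: simpler
-- what changed: Replaces the split-into-pieces-and-reconcatenate-all-but-last counting loop with a single reverse search (rfind) for the last separator and one prefix slice.
import Mathlib
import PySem

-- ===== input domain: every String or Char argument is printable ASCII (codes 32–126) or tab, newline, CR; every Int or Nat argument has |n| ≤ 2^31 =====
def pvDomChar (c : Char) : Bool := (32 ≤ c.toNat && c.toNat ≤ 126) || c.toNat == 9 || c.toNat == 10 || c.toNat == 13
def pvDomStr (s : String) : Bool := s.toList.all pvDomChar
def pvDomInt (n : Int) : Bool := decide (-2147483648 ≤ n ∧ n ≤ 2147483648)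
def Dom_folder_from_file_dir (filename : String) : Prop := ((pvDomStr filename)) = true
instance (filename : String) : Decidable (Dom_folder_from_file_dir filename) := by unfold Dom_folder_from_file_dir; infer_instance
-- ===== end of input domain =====

-- B replaces A's split-into-pieces-and-reconcatenate-all-but-last counting loop by a single
-- rfind of the last '/' and one slice (simpler decomposition, same output).

-- ===== PORT A =====
-- Python string values are ported on code points (List Char, PySem.Chars), String.mk at the end.
def folder_from_file_dir (filename : String) : String :=
  -- filename = filename.replace("\\", "/")
  let f := PySem.Chars.replace filename.toList ['\\'] ['/']
  -- splitDir = filename.split("/")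
  let splitDir := PySem.Chars.splitOn f ['/']
  -- for x in splitDir: dirCount += 1; if dirCount < len(splitDir): returnString += x + "/"
  let st := splitDir.foldl
    (fun (st : Nat × List Char) x =>
      (st.1 + 1, if st.1 + 1 < splitDir.length then st.2 ++ x ++ ['/'] else st.2))
    (0, [])
  String.mk st.2

-- ===== PORT B =====
def folder_from_file_dir_alt (filename : String) : String :=
  -- filename = filename.replace("\\", "/")
  let f := PySem.Chars.replace filename.toList ['\\'] ['/']
  -- idx = filename.rfind("/")
  let idx := PySem.Chars.rfind f ['/']
  -- return "" if idx == -1 else filename[:idx+1]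
  if idx = -1 then "" else String.mk (PySem.Chars.slice f none (some (idx + 1)))

-- ===== PRECONDITION & SPEC =====
def Spec_folder_from_file_dir (filename : String) (out : String) : Prop := out = folder_from_file_dir_alt filename
instance (filename : String) (out : String) : Decidable (Spec_folder_from_file_dir filename out) := by unfold Spec_folder_from_file_dir; infer_instance

-- ===== CLAIM (what is proved, stated in full; the proofs are below) =====
def Claim_equal_folder_from_file_dir : Prop := ∀ (filename : String), Dom_folder_from_file_dir filename → Spec_folder_from_file_dir filename (folder_from_file_dir filename)

-- ===== LEMMAS AND PROOFS =====

-- Reference: split on '/' (structural)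
def pvSplitC : List Char → List (List Char)
  | [] => [[]]
  | c :: r =>
    if c = '/' then [] :: pvSplitC r
    else match pvSplitC r with
         | [] => [[c]]
         | p :: ps => (c :: p) :: ps

-- Reference: the directory prefix (structural)
def pvDirP : List Char → List Char
  | [] => []
  | c :: r =>
    if c = '/' then c :: pvDirP r
    else if '/' ∈ r then c :: pvDirP r else []

def pvConsHead (x : List Char) : List (List Char) → List (List Char)
  | [] => [x]
  | p :: ps => (x ++ p) :: ps

theorem pvSplitC_ne_nil (t : List Char) : pvSplitC t ≠ [] := by
  cases t with
  | nil => simp [pvSplitC]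
  | cons c r =>
    simp only [pvSplitC]
    split
    · simp
    · cases h : pvSplitC r <;> simp

theorem pvConsHead_consHead (a b : List Char) (l : List (List Char)) :
    pvConsHead a (pvConsHead b l) = pvConsHead (a ++ b) l := by
  cases l <;> simp [pvConsHead]

theorem pvSplitC_cons (c : Char) (r : List Char) :
    pvSplitC (c :: r) = if c = '/' then [] :: pvSplitC r else pvConsHead [c] (pvSplitC r) := by
  simp only [pvSplitC]
  split
  · rfl
  · cases h : pvSplitC r <;> simp [pvConsHead]

theorem pvMem_slash_iff (r : List Char) : '/' ∈ r ↔ 1 < (pvSplitC r).length := by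
  induction r with
  | nil => simp [pvSplitC]
  | cons c t ih =>
    rw [pvSplitC_cons]
    by_cases hc : c = '/'
    · subst hc
      rw [if_pos rfl]
      have h1 : (pvSplitC t).length ≠ 0 := by simpa using pvSplitC_ne_nil t
      simp only [List.length_cons, List.mem_cons]
      constructor
      · intro _; omega
      · intro _; exact Or.inl trivial
    · rw [if_neg hc]
      have hne := pvSplitC_ne_nil t
      cases h : pvSplitC t with
      | nil => exact absurd h hne
      | cons p ps =>
        rw [h] at ih
        simp only [pvConsHead, List.mem_cons, List.length_cons] at ih ⊢
        constructor
        · rintro (h1 | h2)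
          · exact absurd h1.symm hc
          · exact ih.mp h2
        · intro hl; exact Or.inr (ih.mpr hl)

-- splitOn.go characterisation (single-char separator '/')
theorem pvSplitOn_go_eq (l : List Char) (fuel : Nat) (hf : l.length ≤ fuel)
    (cur : List Char) (acc : List (List Char)) :
    PySem.Chars.splitOn.go ['/'] fuel l cur acc
      = acc.reverse ++ pvConsHead cur.reverse (pvSplitC l) := by
  induction fuel generalizing l cur acc with
  | zero =>
    have : l = [] := by
      cases l with
      | nil => rfl
      | cons a b => simp at hf
    subst this
    simp [PySem.Chars.splitOn.go, pvSplitC, pvConsHead]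
  | succ n ih =>
    cases l with
    | nil => simp [PySem.Chars.splitOn.go, pvSplitC, pvConsHead]
    | cons c t =>
      rw [PySem.Chars.splitOn.go]
      by_cases hc : c = '/'
      · subst hc
        have hpre : List.isPrefixOf ['/'] ('/' :: t) = true := by
          simp [List.isPrefixOf]
        rw [if_pos hpre]
        simp only [List.length_singleton, List.drop_one, List.tail_cons]
        rw [ih t (by simpa using Nat.le_of_succ_le_succ (by simpa using hf)) [] (cur.reverse :: acc)]
        rw [pvSplitC_cons, if_pos rfl]
        cases h : pvSplitC t with
        | nil => exact absurd h (pvSplitC_ne_nil t)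
        | cons p ps => simp [pvConsHead]
      · have hpre : List.isPrefixOf ['/'] (c :: t) = false := by
          simp [List.isPrefixOf, Ne.symm hc]
        rw [if_neg (by simp [hpre])]
        rw [ih t (by simpa using Nat.le_of_succ_le_succ (by simpa using hf)) (c :: cur) acc]
        rw [pvSplitC_cons, if_neg hc, pvConsHead_consHead]
        simp

theorem pvSplitOn_eq (t : List Char) : PySem.Chars.splitOn t ['/'] = pvSplitC t := by
  rw [PySem.Chars.splitOn, pvSplitOn_go_eq t (t.length + 1) (by omega) [] []]
  have := pvSplitC_ne_nil t
  cases h : pvSplitC t with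
  | nil => exact absurd h this
  | cons p ps => simp [pvConsHead]

-- A's counting fold = concatenation of all-but-last pieces each followed by '/'
theorem pvFold_eq (qs : List (List Char)) (L : Nat) :
    ∀ (k : Nat) (acc : List Char), k + qs.length = L →
    (qs.foldl
      (fun (st : Nat × List Char) x =>
        (st.1 + 1, if st.1 + 1 < L then st.2 ++ x ++ ['/'] else st.2))
      (k, acc)).2
      = acc ++ ((qs.dropLast.map (· ++ ['/'])).flatten) := by
  induction qs with
  | nil => intro k acc _; simp
  | cons x qs ih =>
    intro k acc hk
    simp only [List.foldl_cons]
    cases qs with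
    | nil =>
      have : ¬ (k + 1 < L) := by simp at hk; omega
      rw [if_neg this]
      simp
    | cons y ys =>
      have : k + 1 < L := by simp at hk; omega
      rw [if_pos this]
      rw [ih (k + 1) (acc ++ x ++ ['/']) (by simp at hk ⊢; omega)]
      simp [List.dropLast_cons_of_ne_nil]

theorem pvNoSlash_dirP (t : List Char) (h : '/' ∉ t) : pvDirP t = [] := by
  induction t with
  | nil => rfl
  | cons c r ih =>
    simp only [List.mem_cons, not_or] at h
    simp [pvDirP, Ne.symm h.1, h.2]

theorem pvFlatten_eq_dirP (t : List Char) :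
    (((pvSplitC t).dropLast.map (· ++ ['/'])).flatten) = pvDirP t := by
  induction t with
  | nil => simp [pvSplitC, pvDirP]
  | cons c r ih =>
    rw [pvSplitC_cons]
    by_cases hc : c = '/'
    · subst hc
      rw [if_pos rfl]
      rw [List.dropLast_cons_of_ne_nil (pvSplitC_ne_nil r)]
      simp only [List.map_cons, List.flatten_cons, List.nil_append, List.singleton_append]
      rw [ih]
      simp [pvDirP]
    · rw [if_neg hc]
      have hne := pvSplitC_ne_nil r
      cases h : pvSplitC r with
      | nil => exact absurd h hne
      | cons p ps =>
        cases ps with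
        | nil =>
          have hnm : '/' ∉ r := by
            rw [pvMem_slash_iff, h]; simp
          simp [pvConsHead, pvDirP, hc, hnm]
        | cons q qs =>
          have hm : '/' ∈ r := by
            rw [pvMem_slash_iff, h]; simp
          simp only [pvConsHead]
          rw [List.dropLast_cons_of_ne_nil (by simp)]
          simp only [List.map_cons, List.flatten_cons, pvDirP, hc, if_pos hm]
          rw [h] at ih
          rw [List.dropLast_cons_of_ne_nil (by simp)] at ih
          simp at ih ⊢
          rw [ih]

-- isPrefixOf ['/'] (drop j s) reads s[j]?
theorem pvPrefix_slash (s : List Char) (j : Nat) :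
    List.isPrefixOf ['/'] (s.drop j) = true ↔ s[j]? = some '/' := by
  rw [← List.head?_drop]
  cases h : s.drop j with
  | nil => simp [List.isPrefixOf]
  | cons a b =>
    rw [List.isPrefixOf_iff_prefix, List.cons_prefix_cons]
    simp only [List.nil_prefix, and_true, List.head?_cons, Option.some.injEq]
    exact eq_comm

-- rfind.go: either no '/' at index ≤ j, or the largest such index
theorem pvRfind_go_cases (t : List Char) (j : Nat) :
    (PySem.Chars.rfind.go t ['/'] j = -1 ∧ ∀ i ≤ j, t[i]? ≠ some '/')
    ∨ (∃ k : Nat, PySem.Chars.rfind.go t ['/'] j = (k : Int) ∧ k ≤ j ∧ t[k]? = some '/'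
        ∧ ∀ i, k < i → i ≤ j → t[i]? ≠ some '/') := by
  induction j with
  | zero =>
    rw [PySem.Chars.rfind.go]
    by_cases h : List.isPrefixOf ['/'] t = true
    · right
      refine ⟨0, by rw [if_pos h]; simp, le_refl _, ?_, by intro i h1 h2; omega⟩
      exact (pvPrefix_slash t 0).mp (by simpa using h)
    · left
      refine ⟨by rw [if_neg h], ?_⟩
      intro i hi hc
      have hi0 : i = 0 := by omega
      subst hi0
      have : List.isPrefixOf ['/'] (t.drop 0) = true := (pvPrefix_slash t 0).mpr hc
      simp only [List.drop_zero] at this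
      exact h this
  | succ n ih =>
    rw [PySem.Chars.rfind.go]
    by_cases h : List.isPrefixOf ['/'] (t.drop (n + 1)) = true
    · right
      refine ⟨n + 1, by rw [if_pos h], le_refl _, (pvPrefix_slash t (n+1)).mp h, ?_⟩
      intro i hi1 hi2; omega
    · rw [if_neg h]
      have hn : t[n+1]? ≠ some '/' := fun hc => h ((pvPrefix_slash t (n+1)).mpr hc)
      rcases ih with ⟨he, hall⟩ | ⟨k, he, hk, hslash, hafter⟩
      · left
        refine ⟨he, ?_⟩
        intro i hi
        rcases Nat.lt_or_ge i (n + 1) with h1 | h1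
        · exact hall i (by omega)
        · have : i = n + 1 := by omega
          subst this; exact hn
      · right
        refine ⟨k, he, by omega, hslash, ?_⟩
        intro i hi1 hi2
        rcases Nat.lt_or_ge i (n + 1) with h1 | h1
        · exact hafter i hi1 (by omega)
        · have : i = n + 1 := by omega
          subst this; exact hn

theorem pvTake_eq_dirP (t : List Char) :
    ∀ (k : Nat), t[k]? = some '/' → (∀ i, k < i → t[i]? ≠ some '/') →
    t.take (k + 1) = pvDirP t := by
  induction t with
  | nil => intro k hk _; simp at hk
  | cons c r ih =>
    intro k hk hafter
    cases k with
    | zero =>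
      simp only [List.getElem?_cons_zero, Option.some.injEq] at hk
      subst hk
      have hnm : '/' ∉ r := by
        intro hm
        rcases List.mem_iff_getElem?.mp hm with ⟨i, hi⟩
        exact hafter (i + 1) (by omega) (by simpa using hi)
      simp [pvDirP, pvNoSlash_dirP r hnm]
    | succ n =>
      simp only [List.getElem?_cons_succ] at hk
      have hafter' : ∀ i, n < i → r[i]? ≠ some '/' := by
        intro i hi
        have := hafter (i + 1) (by omega)
        simpa using this
      have hm : '/' ∈ r := List.mem_iff_getElem?.mpr ⟨n, hk⟩
      have := ih n hk hafter'
      simp only [pvDirP, if_pos hm]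
      by_cases hc : c = '/' <;> simp [hc, List.take_succ_cons, this]

theorem pvNoSlash_of_all (t : List Char) (h : ∀ i ≤ t.length, t[i]? ≠ some '/') : '/' ∉ t := by
  intro hm
  rcases List.mem_iff_getElem?.mp hm with ⟨i, hi⟩
  have : i < t.length := (List.getElem?_eq_some_iff.mp hi).1
  exact h i (by omega) hi

-- A's core and B's core both compute pvDirP
theorem pvA_core (t : List Char) :
    ((PySem.Chars.splitOn t ['/']).foldl
      (fun (st : Nat × List Char) x =>
        (st.1 + 1, if st.1 + 1 < (PySem.Chars.splitOn t ['/']).length then st.2 ++ x ++ ['/'] else st.2))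
      (0, [])).2 = pvDirP t := by
  rw [pvSplitOn_eq]
  rw [pvFold_eq (pvSplitC t) (pvSplitC t).length 0 [] (by omega)]
  simpa using pvFlatten_eq_dirP t

theorem pvB_core (t : List Char) :
    (if PySem.Chars.rfind t ['/'] = -1 then ""
     else String.mk (PySem.Chars.slice t none (some (PySem.Chars.rfind t ['/'] + 1))))
      = String.mk (pvDirP t) := by
  rw [PySem.Chars.rfind]
  rcases pvRfind_go_cases t t.length with ⟨he, hall⟩ | ⟨k, he, hk, hslash, hafter⟩
  · rw [he, if_pos rfl]
    rw [pvNoSlash_dirP t (pvNoSlash_of_all t hall)]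
    rfl
  · rw [he, if_neg (by omega)]
    have hkl : k < t.length := (List.getElem?_eq_some_iff.mp hslash).1
    have hafter' : ∀ i, k < i → t[i]? ≠ some '/' := by
      intro i hi
      rcases Nat.lt_or_ge i t.length with h1 | h1
      · exact hafter i hi (by omega)
      · simp [List.getElem?_eq_none (by omega : t.length ≤ i)]
    have hs : PySem.Chars.slice t none (some ((k : Int) + 1)) = t.take (k + 1) := by
      simp only [PySem.Chars.slice_eq_listSlice]
      rw [PySem.List.slice_to t (by omega : (0:Int) ≤ (k : Int) + 1)]
      congr 1
    rw [hs, pvTake_eq_dirP t k hslash hafter']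

-- ===== VERDICT (by name: the statement is the Claim_ definition above) =====
theorem folder_from_file_dir_spec : Claim_equal_folder_from_file_dir := by
  intro filename _
  unfold Spec_folder_from_file_dir folder_from_file_dir folder_from_file_dir_alt
  simp only []
  rw [pvB_core, pvA_core]
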